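-- pv_equiv track=rewrite | github.com/jessegrabowski/gEconpy | gEcon/shared/dynare_convert.py | write_lines_from_list
-- ===== SOURCE A (Python) =====
-- def write_lines_from_list(l, file, line_start='', line_max=50):
--     line = line_start
--     for item in sorted(l):
--         line += f' {item},'
--         if len(line) > line_max:
--             line = line[:-1]
--             line = line + ';\n'
--             file += line
--             line = line_start
--
--     if line != line_start:
--         line = line[:-1]
--         file += line + ';\n'
--
--     return file
-- ===== SOURCE B (Python) =====
-- def write_lines_from_list(l, file, line_start='', line_max=50):
--     # Two-pass: partition sorted items into line groups, then render each group.
--     groups = []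
--     cur = []
--     n = len(line_start)
--     for item in sorted(l):
--         cur = cur + [item]
--         n += len(item) + 2
--         if n > line_max:
--             groups.append(cur)
--             cur = []
--             n = len(line_start)
--     if cur:
--         groups.append(cur)
--     body = ''.join(line_start + ''.join(f' {x},' for x in g)[:-1] + ';\n'
--                    for g in groups)
--     return file + body
-- ===== Notes on version B (the rewrite author's own statement) =====
-- stated objective: alternative
-- what changed: A's single greedy loop that accumulates a line string and flushes it into the output on overflow is replaced by a two-pass decomposition: first partition the sorted items into line groups using only a running length counter, then render every group into its line and concatenate.
import Mathlib
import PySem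

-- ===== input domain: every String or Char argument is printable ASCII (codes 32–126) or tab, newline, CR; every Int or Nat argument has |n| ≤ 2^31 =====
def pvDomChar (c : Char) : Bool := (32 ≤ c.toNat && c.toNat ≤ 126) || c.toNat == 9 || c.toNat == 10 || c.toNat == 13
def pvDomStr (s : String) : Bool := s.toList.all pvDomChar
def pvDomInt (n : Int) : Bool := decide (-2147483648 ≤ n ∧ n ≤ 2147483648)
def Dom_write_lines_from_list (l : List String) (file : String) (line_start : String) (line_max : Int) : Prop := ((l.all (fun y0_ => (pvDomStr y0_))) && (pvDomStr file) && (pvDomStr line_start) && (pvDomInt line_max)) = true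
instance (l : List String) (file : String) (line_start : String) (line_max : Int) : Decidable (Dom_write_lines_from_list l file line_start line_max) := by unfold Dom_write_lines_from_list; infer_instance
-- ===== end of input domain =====

-- B rewrites A's single greedy accumulate-and-flush loop as two passes: partition
-- the sorted items into line groups, then render every group (objective: alternative decomposition).
-- Strings are handled on the List Char side (PySem convention); line[:-1] is dropLast
-- (exact: PySem.List.slice_to_neg_one).

-- ===== PORT A =====
-- one step of A's for-loop; state = (line, file) as char lists
def stepA (ls : List Char) (line_max : Int) (st : List Char × List Char) (item : String) :
    List Char × List Char :=
  let line := st.1 ++ ' ' :: (item.toList ++ [','])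
  if line_max < (line.length : Int) then
    (ls, st.2 ++ line.dropLast ++ [';', '\n'])
  else (line, st.2)

def write_lines_from_list (l : List String) (file : String) (line_start : String) (line_max : Int) : String :=
  let ls := line_start.toList
  let st := (PySem.List.sorted l (fun x => x) false).foldl (stepA ls line_max) (ls, file.toList)
  if st.1 ≠ ls then String.ofList (st.2 ++ st.1.dropLast ++ [';', '\n'])
  else String.ofList st.2

-- ===== PORT B =====
-- one step of B's partitioning loop; state = (groups, cur, n)
def stepB (lsLen : Int) (line_max : Int) (st : List (List String) × List String × Int) (item : String) :
    List (List String) × List String × Int :=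
  let cur := st.2.1 ++ [item]
  let n := st.2.2 + (item.toList.length : Int) + 2
  if line_max < n then (st.1 ++ [cur], [], lsLen)
  else (st.1, cur, n)

def write_lines_from_list_alt (l : List String) (file : String) (line_start : String) (line_max : Int) : String :=
  let ls := line_start.toList
  let st := (PySem.List.sorted l (fun x => x) false).foldl (stepB (ls.length : Int) line_max)
      ([], [], (ls.length : Int))
  let gs := if st.2.1 ≠ [] then st.1 ++ [st.2.1] else st.1
  String.ofList (file.toList ++
    (gs.map (fun g => ls ++ (g.flatMap (fun x => ' ' :: (x.toList ++ [',']))).dropLast ++ [';', '\n'])).flatten)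

-- ===== PRECONDITION & SPEC =====
def Spec_write_lines_from_list (l : List String) (file : String) (line_start : String) (line_max : Int) (out : String) : Prop := out = write_lines_from_list_alt l file line_start line_max
instance (l : List String) (file : String) (line_start : String) (line_max : Int) (out : String) : Decidable (Spec_write_lines_from_list l file line_start line_max out) := by unfold Spec_write_lines_from_list; infer_instance

-- ===== CLAIM (what is proved, stated in full; the proofs are below) =====
def Claim_equal_write_lines_from_list : Prop := ∀ (l : List String) (file : String) (line_start : String) (line_max : Int), Dom_write_lines_from_list l file line_start line_max → Spec_write_lines_from_list l file line_start line_max (write_lines_from_list l file line_start line_max)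

-- ===== LEMMAS AND PROOFS =====

-- rendering helpers (proof-side vocabulary for B's second pass)
def rend (cur : List String) : List Char := cur.flatMap (fun x => ' ' :: (x.toList ++ [',']))

def rGroup (ls : List Char) (g : List String) : List Char := ls ++ (rend g).dropLast ++ [';', '\n']

def rGroups (ls : List Char) (gs : List (List String)) : List Char := (gs.map (rGroup ls)).flatten

theorem rend_append_singleton (cur : List String) (item : String) :
    rend (cur ++ [item]) = rend cur ++ ' ' :: (item.toList ++ [',']) := by
  simp [rend]

theorem rend_eq_nil_iff (cur : List String) : rend cur = [] ↔ cur = [] := by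
  cases cur with
  | nil => simp [rend]
  | cons x xs => simp [rend]

theorem rGroups_append_singleton (ls : List Char) (gs : List (List String)) (g : List String) :
    rGroups ls (gs ++ [g]) = rGroups ls gs ++ rGroup ls g := by
  simp [rGroups]

theorem loop_eq (ls : List Char) (lm : Int) :
    ∀ (items cur : List String) (gs : List (List String)) (f : List Char),
    (let st := items.foldl (stepA ls lm) (ls ++ rend cur, f ++ rGroups ls gs);
     if st.1 ≠ ls then st.2 ++ st.1.dropLast ++ [';', '\n'] else st.2)
    =
    (let st := items.foldl (stepB (ls.length : Int) lm) (gs, cur, (ls.length : Int) + ((rend cur).length : Int));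
     f ++ rGroups ls (if st.2.1 ≠ [] then st.1 ++ [st.2.1] else st.1)) := by
  intro items
  induction items with
  | nil =>
    intro cur gs f
    by_cases hc : cur = []
    · subst hc
      simp [rend, rGroups]
    · have hr : rend cur ≠ [] := fun h => hc ((rend_eq_nil_iff cur).mp h)
      have hne : ls ++ rend cur ≠ ls := by
        intro h
        exact hr (List.append_right_eq_self.mp h)
      simp only [List.foldl_nil, hne, hc, if_pos, ne_eq, not_false_iff]
      rw [rGroups_append_singleton]
      simp only [rGroup, List.dropLast_append_of_ne_nil hr, List.append_assoc]
  | cons item rest ih =>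
    intro cur gs f
    have hlen : ((rend (cur ++ [item])).length : Int)
        = ((rend cur).length : Int) + ((item.toList.length : Int) + 2) := by
      rw [rend_append_singleton]; simp; ring
    by_cases hover : lm < (ls.length : Int) + ((rend cur).length : Int) + (item.toList.length : Int) + 2
    · -- overflow: A flushes the line, B closes the group
      have hA : stepA ls lm (ls ++ rend cur, f ++ rGroups ls gs) item
          = (ls ++ rend ([] : List String),
             (f ++ rGroups ls (gs ++ [cur ++ [item]]))) := by
        simp only [stepA]
        rw [if_pos]
        · rw [rGroups_append_singleton]
          simp [rend, rGroup,
                List.dropLast_append_of_ne_nil]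
        · have hit : item.toList.length = item.length := by simp
          simp; omega
      have hB : stepB (ls.length : Int) lm (gs, cur, (ls.length : Int) + ((rend cur).length : Int)) item
          = (gs ++ [cur ++ [item]], ([] : List String), (ls.length : Int)) := by
        simp only [stepB]
        have hit : item.toList.length = item.length := by simp
        rw [if_pos]
        · omega
      simp only [List.foldl_cons, hA, hB]
      have := ih ([] : List String) (gs ++ [cur ++ [item]]) f
      simpa [rend] using this
    · have hA : stepA ls lm (ls ++ rend cur, f ++ rGroups ls gs) item
          = (ls ++ rend (cur ++ [item]), f ++ rGroups ls gs) := by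
        simp only [stepA]
        rw [if_neg]
        · rw [rend_append_singleton]; simp
        · have hit : item.toList.length = item.length := by simp
          simp; omega
      have hB : stepB (ls.length : Int) lm (gs, cur, (ls.length : Int) + ((rend cur).length : Int)) item
          = (gs, cur ++ [item], (ls.length : Int) + ((rend (cur ++ [item])).length : Int)) := by
        simp only [stepB]
        rw [if_neg]
        · simp [hlen]; ring
        · omega
      simp only [List.foldl_cons, hA, hB]
      exact ih (cur ++ [item]) gs f

-- ===== VERDICT (by name: the statement is the Claim_ definition above) =====
theorem write_lines_from_list_spec : Claim_equal_write_lines_from_list := by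
  intro l file line_start line_max _
  unfold Spec_write_lines_from_list write_lines_from_list write_lines_from_list_alt
  have h := loop_eq line_start.toList line_max
    (PySem.List.sorted l (fun x => x) false) [] [] file.toList
  simp only [rend, rGroups, List.flatMap_nil, List.append_nil, List.map_nil,
    List.flatten_nil, List.length_nil, Nat.cast_zero, add_zero] at h
  simp only []
  rw [← apply_ite String.ofList]
  exact congrArg String.ofList h
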